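-- pv_equiv track=rewrite | github.com/brandonbrown122/rfq-dashboard | refresh_positions.py | _classify_sport_from_leg
-- ===== SOURCE A (Python) =====
-- NBA_TEAMS = {
--     "ATLANTA", "HAWKS", "BOSTON", "CELTICS", "BROOKLYN", "NETS", "CHARLOTTE", "HORNETS",
--     "CHICAGO", "BULLS", "CLEVELAND", "CAVALIERS", "DALLAS", "MAVERICKS", "DENVER", "NUGGETS",
--     "DETROIT", "PISTONS", "GOLDEN STATE", "WARRIORS", "HOUSTON", "ROCKETS", "INDIANA", "PACERS",
--     "LOS ANGELES L", "LAKERS", "LOS ANGELES C", "CLIPPERS", "MEMPHIS", "GRIZZLIES",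
--     "MIAMI", "HEAT", "MILWAUKEE", "BUCKS", "MINNESOTA", "TIMBERWOLVES", "NEW ORLEANS", "PELICANS",
--     "NEW YORK", "KNICKS", "OKLAHOMA CITY", "THUNDER", "ORLANDO", "MAGIC", "PHILADELPHIA", "76ERS",
--     "PHOENIX", "SUNS", "PORTLAND", "TRAIL BLAZERS", "BLAZERS", "SACRAMENTO", "KINGS",
--     "SAN ANTONIO", "SPURS", "TORONTO", "RAPTORS", "UTAH", "JAZZ", "WASHINGTON", "WIZARDS",
-- }
--
-- NHL_TEAMS = {
--     "BRUINS", "SABRES", "RED WINGS", "PANTHERS", "CANADIENS", "SENATORS", "LIGHTNING",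
--     "MAPLE LEAFS", "HURRICANES", "BLUE JACKETS", "DEVILS", "ISLANDERS", "RANGERS",
--     "FLYERS", "PENGUINS", "CAPITALS", "BLACKHAWKS", "AVALANCHE", "STARS", "WILD",
--     "PREDATORS", "BLUES", "JETS", "FLAMES", "OILERS", "CANUCKS", "DUCKS",
--     "COYOTES", "KRAKEN", "SHARKS", "GOLDEN KNIGHTS", "KNIGHTS",
-- }
--
-- def _classify_sport_from_leg(leg_str):
--     """Classify sport from a leg description."""
--     upper = leg_str.upper()
--
--     # Check ticker suffix if present
--     if "KXMLB" in upper or "KXMVEMLB" in upper: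
--         return "mlb"
--     if "KXNBA" in upper or "KXMVENBA" in upper:
--         return "nba"
--     if "KXNCAAMB" in upper or "KXNCAAB" in upper or "KXMVENCAAMB" in upper:
--         return "ncaab"
--     if "KXNHL" in upper or "KXMVENHL" in upper:
--         return "nhl"
--     if any(t in upper for t in ("KXEPL", "KXLALIGA", "KXSERIEA", "KXBUNDESLIGA", "KXLIGUE1", "KXUCL", "KXSOCCER")):
--         return "soccer"
--
--     # Bet type keywords for sport detection
--     if any(k in upper for k in ("TOTAL RUNS", "HITS", "STRIKEOUTS", "RBI", "INNINGS", "HOME RUN", "EARNED RUN")):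
--         return "mlb"
--     if any(k in upper for k in ("PTS", "REB", "AST", "3PM", "BLK", "STL", "POINTS SCORED")):
--         return "nba"
--     if "WINS BY OVER" in upper and "POINTS" in upper:
--         return "nba"
--     if any(k in upper for k in ("GOALS", "BTTS", "BOTH TEAMS TO SCORE", "CLEAN SHEET")):
--         return "soccer"
--     if any(k in upper for k in ("SAVES", "SHOTS ON GOAL")):
--         return "nhl"
--
--     # Strip "yes " / "no " prefix and check team names
--     clean = upper
--     if clean.startswith("YES "):
--         clean = clean[4:]
--     elif clean.startswith("NO "):
--         clean = clean[3:]
--     clean = clean.strip()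
--     if any(team in clean for team in NHL_TEAMS):
--         return "nhl"
--     if any(team in clean for team in NBA_TEAMS):
--         return "nba"
--
--     return "other"
-- ===== SOURCE B (Python) =====
-- NBA_TEAMS = (
--     "ATLANTA", "HAWKS", "BOSTON", "CELTICS", "BROOKLYN", "NETS", "CHARLOTTE", "HORNETS",
--     "CHICAGO", "BULLS", "CLEVELAND", "CAVALIERS", "DALLAS", "MAVERICKS", "DENVER", "NUGGETS",
--     "DETROIT", "PISTONS", "GOLDEN STATE", "WARRIORS", "HOUSTON", "ROCKETS", "INDIANA", "PACERS",
--     "LOS ANGELES L", "LAKERS", "LOS ANGELES C", "CLIPPERS", "MEMPHIS", "GRIZZLIES",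
--     "MIAMI", "HEAT", "MILWAUKEE", "BUCKS", "MINNESOTA", "TIMBERWOLVES", "NEW ORLEANS", "PELICANS",
--     "NEW YORK", "KNICKS", "OKLAHOMA CITY", "THUNDER", "ORLANDO", "MAGIC", "PHILADELPHIA", "76ERS",
--     "PHOENIX", "SUNS", "PORTLAND", "TRAIL BLAZERS", "BLAZERS", "SACRAMENTO", "KINGS",
--     "SAN ANTONIO", "SPURS", "TORONTO", "RAPTORS", "UTAH", "JAZZ", "WASHINGTON", "WIZARDS",
-- )
--
-- NHL_TEAMS = (
--     "BRUINS", "SABRES", "RED WINGS", "PANTHERS", "CANADIENS", "SENATORS", "LIGHTNING",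
--     "MAPLE LEAFS", "HURRICANES", "BLUE JACKETS", "DEVILS", "ISLANDERS", "RANGERS",
--     "FLYERS", "PENGUINS", "CAPITALS", "BLACKHAWKS", "AVALANCHE", "STARS", "WILD",
--     "PREDATORS", "BLUES", "JETS", "FLAMES", "OILERS", "CANUCKS", "DUCKS",
--     "COYOTES", "KRAKEN", "SHARKS", "GOLDEN KNIGHTS", "KNIGHTS",
-- )
--
-- # every keyword that is searched for in the (un-stripped) uppercased string
-- UPPER_KEYWORDS = (
--     "KXMLB", "KXMVEMLB", "KXNBA", "KXMVENBA", "KXNCAAMB", "KXNCAAB", "KXMVENCAAMB",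
--     "KXNHL", "KXMVENHL", "KXEPL", "KXLALIGA", "KXSERIEA", "KXBUNDESLIGA", "KXLIGUE1",
--     "KXUCL", "KXSOCCER", "TOTAL RUNS", "HITS", "STRIKEOUTS", "RBI", "INNINGS",
--     "HOME RUN", "EARNED RUN", "PTS", "REB", "AST", "3PM", "BLK", "STL",
--     "POINTS SCORED", "WINS BY OVER", "POINTS", "GOALS", "BTTS",
--     "BOTH TEAMS TO SCORE", "CLEAN SHEET", "SAVES", "SHOTS ON GOAL",
-- )
--
--
-- def _scan(text, keywords):
--     """One left-to-right pass over the text positions, collecting every keyword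
--     that occurs somewhere in the text (occurrence = keyword starts at some position).
--     A first-character bucket index keeps the per-position work to the few keywords
--     that could start there."""
--     index = {}
--     for k in keywords:
--         index.setdefault(k[0], []).append(k)
--     found = set()
--     for i, c in enumerate(text):
--         for k in index.get(c, ()):
--             if text.startswith(k, i):
--                 found.add(k)
--     return found
--
--
-- def _decide(found_kw, found_team):
--     """Pure priority resolution on the occurrence sets."""
--     if "KXMLB" in found_kw or "KXMVEMLB" in found_kw:
--         return "mlb"
--     if "KXNBA" in found_kw or "KXMVENBA" in found_kw:
--         return "nba"
--     if "KXNCAAMB" in found_kw or "KXNCAAB" in found_kw or "KXMVENCAAMB" in found_kw: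
--         return "ncaab"
--     if "KXNHL" in found_kw or "KXMVENHL" in found_kw:
--         return "nhl"
--     if any(t in found_kw for t in ("KXEPL", "KXLALIGA", "KXSERIEA", "KXBUNDESLIGA", "KXLIGUE1", "KXUCL", "KXSOCCER")):
--         return "soccer"
--     if any(k in found_kw for k in ("TOTAL RUNS", "HITS", "STRIKEOUTS", "RBI", "INNINGS", "HOME RUN", "EARNED RUN")):
--         return "mlb"
--     if any(k in found_kw for k in ("PTS", "REB", "AST", "3PM", "BLK", "STL", "POINTS SCORED")):
--         return "nba"
--     if "WINS BY OVER" in found_kw and "POINTS" in found_kw: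
--         return "nba"
--     if any(k in found_kw for k in ("GOALS", "BTTS", "BOTH TEAMS TO SCORE", "CLEAN SHEET")):
--         return "soccer"
--     if any(k in found_kw for k in ("SAVES", "SHOTS ON GOAL")):
--         return "nhl"
--     if any(t in found_team for t in NHL_TEAMS):
--         return "nhl"
--     if any(t in found_team for t in NBA_TEAMS):
--         return "nba"
--     return "other"
--
--
-- def _classify_sport_from_leg(leg_str):
--     """Classify sport from a leg description: scan once for all keyword occurrences,
--     then resolve the label from the occurrence sets."""
--     upper = leg_str.upper()
--     clean = upper
--     if clean.startswith("YES "):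
--         clean = clean[4:]
--     elif clean.startswith("NO "):
--         clean = clean[3:]
--     clean = clean.strip()
--     return _decide(_scan(upper, UPPER_KEYWORDS), _scan(clean, NHL_TEAMS + NBA_TEAMS))
-- ===== Notes on version B (the rewrite author's own statement) =====
-- stated objective: alternative
-- what changed: Instead of A's ordered chain of substring-membership tests, B makes one positional scan of the text (startswith at each position, bucketed by first character) that collects the set of all occurring keywords, and then resolves the label by a pure priority decision on the occurrence sets.
import Mathlib
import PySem

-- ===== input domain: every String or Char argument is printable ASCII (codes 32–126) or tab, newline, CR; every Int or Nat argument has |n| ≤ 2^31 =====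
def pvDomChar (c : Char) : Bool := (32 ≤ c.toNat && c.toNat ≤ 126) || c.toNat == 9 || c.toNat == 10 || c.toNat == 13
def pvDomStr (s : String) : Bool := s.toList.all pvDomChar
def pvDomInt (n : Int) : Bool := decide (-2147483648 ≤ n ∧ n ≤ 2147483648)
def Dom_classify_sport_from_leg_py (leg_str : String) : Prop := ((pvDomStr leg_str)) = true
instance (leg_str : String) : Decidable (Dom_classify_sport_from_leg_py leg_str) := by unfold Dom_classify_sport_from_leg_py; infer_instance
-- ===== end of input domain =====

-- B replaces A's ordered chain of substring-membership tests by one positional scan collecting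
-- the set of all occurring keywords, then a pure priority resolution on the occurrence sets
-- (objective: alternative decomposition; same behaviour, no speed claim).
-- Sets NBA_TEAMS / NHL_TEAMS are ported as their literal element lists ('any' over a set is order-independent).

-- ===== PORT A =====
def pvNbaTeams : List String := [
  "ATLANTA", "HAWKS", "BOSTON", "CELTICS", "BROOKLYN", "NETS", "CHARLOTTE", "HORNETS",
  "CHICAGO", "BULLS", "CLEVELAND", "CAVALIERS", "DALLAS", "MAVERICKS", "DENVER", "NUGGETS",
  "DETROIT", "PISTONS", "GOLDEN STATE", "WARRIORS", "HOUSTON", "ROCKETS", "INDIANA", "PACERS",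
  "LOS ANGELES L", "LAKERS", "LOS ANGELES C", "CLIPPERS", "MEMPHIS", "GRIZZLIES",
  "MIAMI", "HEAT", "MILWAUKEE", "BUCKS", "MINNESOTA", "TIMBERWOLVES", "NEW ORLEANS", "PELICANS",
  "NEW YORK", "KNICKS", "OKLAHOMA CITY", "THUNDER", "ORLANDO", "MAGIC", "PHILADELPHIA", "76ERS",
  "PHOENIX", "SUNS", "PORTLAND", "TRAIL BLAZERS", "BLAZERS", "SACRAMENTO", "KINGS",
  "SAN ANTONIO", "SPURS", "TORONTO", "RAPTORS", "UTAH", "JAZZ", "WASHINGTON", "WIZARDS"]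

def pvNhlTeams : List String := [
  "BRUINS", "SABRES", "RED WINGS", "PANTHERS", "CANADIENS", "SENATORS", "LIGHTNING",
  "MAPLE LEAFS", "HURRICANES", "BLUE JACKETS", "DEVILS", "ISLANDERS", "RANGERS",
  "FLYERS", "PENGUINS", "CAPITALS", "BLACKHAWKS", "AVALANCHE", "STARS", "WILD",
  "PREDATORS", "BLUES", "JETS", "FLAMES", "OILERS", "CANUCKS", "DUCKS",
  "COYOTES", "KRAKEN", "SHARKS", "GOLDEN KNIGHTS", "KNIGHTS"]

def classify_sport_from_leg_py (leg_str : String) : String :=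
  let upper := PySem.Str.upper leg_str
  if PySem.Str.isIn "KXMLB" upper || PySem.Str.isIn "KXMVEMLB" upper then "mlb"
  else if PySem.Str.isIn "KXNBA" upper || PySem.Str.isIn "KXMVENBA" upper then "nba"
  else if PySem.Str.isIn "KXNCAAMB" upper || PySem.Str.isIn "KXNCAAB" upper || PySem.Str.isIn "KXMVENCAAMB" upper then "ncaab"
  else if PySem.Str.isIn "KXNHL" upper || PySem.Str.isIn "KXMVENHL" upper then "nhl"
  else if (["KXEPL", "KXLALIGA", "KXSERIEA", "KXBUNDESLIGA", "KXLIGUE1", "KXUCL", "KXSOCCER"].any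
            (fun t => PySem.Str.isIn t upper)) then "soccer"
  else if (["TOTAL RUNS", "HITS", "STRIKEOUTS", "RBI", "INNINGS", "HOME RUN", "EARNED RUN"].any
            (fun k => PySem.Str.isIn k upper)) then "mlb"
  else if (["PTS", "REB", "AST", "3PM", "BLK", "STL", "POINTS SCORED"].any
            (fun k => PySem.Str.isIn k upper)) then "nba"
  else if PySem.Str.isIn "WINS BY OVER" upper && PySem.Str.isIn "POINTS" upper then "nba"
  else if (["GOALS", "BTTS", "BOTH TEAMS TO SCORE", "CLEAN SHEET"].any
            (fun k => PySem.Str.isIn k upper)) then "soccer"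
  else if (["SAVES", "SHOTS ON GOAL"].any (fun k => PySem.Str.isIn k upper)) then "nhl"
  else
    let clean := upper
    let clean := if PySem.Str.startswith clean "YES " then PySem.Str.slice clean (some 4) none
                 else if PySem.Str.startswith clean "NO " then PySem.Str.slice clean (some 3) none
                 else clean
    let clean := PySem.Str.strip clean
    if pvNhlTeams.any (fun team => PySem.Str.isIn team clean) then "nhl"
    else if pvNbaTeams.any (fun team => PySem.Str.isIn team clean) then "nba"
    else "other"

-- ===== PORT B =====
-- UPPER_KEYWORDS from Source B
def pvUpperKeywords : List String := [
  "KXMLB", "KXMVEMLB", "KXNBA", "KXMVENBA", "KXNCAAMB", "KXNCAAB", "KXMVENCAAMB",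
  "KXNHL", "KXMVENHL", "KXEPL", "KXLALIGA", "KXSERIEA", "KXBUNDESLIGA", "KXLIGUE1",
  "KXUCL", "KXSOCCER", "TOTAL RUNS", "HITS", "STRIKEOUTS", "RBI", "INNINGS",
  "HOME RUN", "EARNED RUN", "PTS", "REB", "AST", "3PM", "BLK", "STL",
  "POINTS SCORED", "WINS BY OVER", "POINTS", "GOALS", "BTTS",
  "BOTH TEAMS TO SCORE", "CLEAN SHEET", "SAVES", "SHOTS ON GOAL"]

-- first-character bucket index of _scan: index.setdefault(k[0], []).append(k) is Dict.modify with default [];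
-- k[0] is ported as k.toList.headD ' ' — exact here, every scanned keyword is a nonempty literal
def pvIndex (keywords : List String) : PySem.Dict Char (List String) :=
  keywords.foldl (fun index k => PySem.Dict.modify index (k.toList.headD ' ') [] (fun l => l ++ [k]))
    PySem.Dict.empty

-- _scan from Source B: a pass over the positions, testing only the keywords in the bucket of that position's
-- character. Python's text.startswith(k, i) for 0 ≤ i is exactly 'k.toList <+: text.drop i'.
def pvScan (text : List Char) (keywords : List String) : PySem.Set String :=
  let index := pvIndex keywords
  (PySem.List.enumerate text 0).foldl
    (fun found ic =>
      (index.getD ic.2 []).foldl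
        (fun found k => if PySem.Chars.startswith (text.drop ic.1.toNat) k.toList then PySem.Set.add found k else found)
        found)
    PySem.Set.empty

-- _decide from Source B: pure priority resolution on the occurrence sets
def pvDecide (fu ft : PySem.Set String) : String :=
  if PySem.Set.contains fu "KXMLB" || PySem.Set.contains fu "KXMVEMLB" then "mlb"
  else if PySem.Set.contains fu "KXNBA" || PySem.Set.contains fu "KXMVENBA" then "nba"
  else if PySem.Set.contains fu "KXNCAAMB" || PySem.Set.contains fu "KXNCAAB" || PySem.Set.contains fu "KXMVENCAAMB" then "ncaab"
  else if PySem.Set.contains fu "KXNHL" || PySem.Set.contains fu "KXMVENHL" then "nhl"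
  else if (["KXEPL", "KXLALIGA", "KXSERIEA", "KXBUNDESLIGA", "KXLIGUE1", "KXUCL", "KXSOCCER"].any
            (fun t => PySem.Set.contains fu t)) then "soccer"
  else if (["TOTAL RUNS", "HITS", "STRIKEOUTS", "RBI", "INNINGS", "HOME RUN", "EARNED RUN"].any
            (fun k => PySem.Set.contains fu k)) then "mlb"
  else if (["PTS", "REB", "AST", "3PM", "BLK", "STL", "POINTS SCORED"].any
            (fun k => PySem.Set.contains fu k)) then "nba"
  else if PySem.Set.contains fu "WINS BY OVER" && PySem.Set.contains fu "POINTS" then "nba"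
  else if (["GOALS", "BTTS", "BOTH TEAMS TO SCORE", "CLEAN SHEET"].any
            (fun k => PySem.Set.contains fu k)) then "soccer"
  else if (["SAVES", "SHOTS ON GOAL"].any (fun k => PySem.Set.contains fu k)) then "nhl"
  else if pvNhlTeams.any (fun team => PySem.Set.contains ft team) then "nhl"
  else if pvNbaTeams.any (fun team => PySem.Set.contains ft team) then "nba"
  else "other"

def classify_sport_from_leg_py_alt (leg_str : String) : String :=
  let upper := PySem.Str.upper leg_str
  let clean := upper
  let clean := if PySem.Str.startswith clean "YES " then PySem.Str.slice clean (some 4) none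
               else if PySem.Str.startswith clean "NO " then PySem.Str.slice clean (some 3) none
               else clean
  let clean := PySem.Str.strip clean
  pvDecide (pvScan upper.toList pvUpperKeywords) (pvScan clean.toList (pvNhlTeams ++ pvNbaTeams))

-- ===== PRECONDITION & SPEC =====
def Spec_classify_sport_from_leg_py (leg_str : String) (out : String) : Prop := out = classify_sport_from_leg_py_alt leg_str
instance (leg_str : String) (out : String) : Decidable (Spec_classify_sport_from_leg_py leg_str out) := by unfold Spec_classify_sport_from_leg_py; infer_instance

-- ===== CLAIM (what is proved, stated in full; the proofs are below) =====
def Claim_equal_classify_sport_from_leg_py : Prop := ∀ (leg_str : String), Dom_classify_sport_from_leg_py leg_str → Spec_classify_sport_from_leg_py leg_str (classify_sport_from_leg_py leg_str)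

-- ===== LEMMAS AND PROOFS =====

-- membership in a bucket of the first-character index
theorem pv_mem_index_fold (kws : List String) (d : PySem.Dict Char (List String)) (c : Char) (k : String) :
    k ∈ (kws.foldl (fun index k' => PySem.Dict.modify index (k'.toList.headD ' ') [] (fun l => l ++ [k'])) d).getD c [] ↔
      k ∈ d.getD c [] ∨ (k ∈ kws ∧ k.toList.headD ' ' = c) := by
  induction kws generalizing d with
  | nil => simp
  | cons x xs ih =>
    rw [List.foldl_cons, ih]
    by_cases hc : x.toList.headD ' ' = c
    · rw [hc, PySem.Dict.getD_modify_self]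
      simp only [List.mem_append, List.mem_cons, List.not_mem_nil, or_false]
      constructor
      · rintro ((h | rfl) | ⟨h1, h2⟩)
        exacts [Or.inl h, Or.inr ⟨Or.inl rfl, hc⟩, Or.inr ⟨Or.inr h1, h2⟩]
      · rintro (h | ⟨rfl | h1, h2⟩)
        exacts [Or.inl (Or.inl h), Or.inl (Or.inr rfl), Or.inr ⟨h1, h2⟩]
    · rw [PySem.Dict.getD_modify_of_ne _ _ _ (fun h => hc h.symm)]
      simp only [List.mem_cons]
      constructor
      · rintro (h | ⟨h1, h2⟩)
        exacts [Or.inl h, Or.inr ⟨Or.inr h1, h2⟩]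
      · rintro (h | ⟨rfl | h1, h2⟩)
        exacts [Or.inl h, absurd h2 hc, Or.inr ⟨h1, h2⟩]

theorem pv_mem_index (kws : List String) (c : Char) (k : String) :
    k ∈ (pvIndex kws).getD c [] ↔ k ∈ kws ∧ k.toList.headD ' ' = c := by
  rw [pvIndex, pv_mem_index_fold]
  simp [PySem.Dict.getD_empty]

-- membership in the inner (bucket) fold of pvScan
theorem pv_mem_inner_fold (P : String → Bool) (kws : List String) (acc : PySem.Set String) (k : String) :
    k ∈ kws.foldl (fun found k' => if P k' then PySem.Set.add found k' else found) acc ↔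
      k ∈ acc ∨ (k ∈ kws ∧ P k = true) := by
  induction kws generalizing acc with
  | nil => simp
  | cons x xs ih =>
    by_cases hx : P x = true
    · rw [List.foldl_cons, if_pos hx, ih]
      simp only [PySem.Set.mem_add, List.mem_cons]
      constructor
      · rintro (⟨h | rfl⟩ | ⟨h1, h2⟩)
        exacts [Or.inl h, Or.inr ⟨Or.inl rfl, hx⟩, Or.inr ⟨Or.inr h1, h2⟩]
      · rintro (h | ⟨rfl | h1, h2⟩)
        exacts [Or.inl (Or.inl h), Or.inl (Or.inr rfl), Or.inr ⟨h1, h2⟩]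
    · rw [List.foldl_cons, if_neg hx, ih]
      simp only [List.mem_cons]
      constructor
      · rintro (h | ⟨h1, h2⟩)
        exacts [Or.inl h, Or.inr ⟨Or.inr h1, h2⟩]
      · rintro (h | ⟨rfl | h1, h2⟩)
        exacts [Or.inl h, absurd h2 hx, Or.inr ⟨h1, h2⟩]

-- membership in the outer (position) fold of pvScan
theorem pv_mem_outer_fold (text : List Char) (index : PySem.Dict Char (List String))
    (ps : List (Int × Char)) (acc : PySem.Set String) (k : String) :
    k ∈ ps.foldl
      (fun found ic =>
        (index.getD ic.2 []).foldl
          (fun found k' =>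
            if PySem.Chars.startswith (text.drop ic.1.toNat) k'.toList then PySem.Set.add found k' else found)
          found)
      acc ↔
      k ∈ acc ∨ ∃ ic ∈ ps, k ∈ index.getD ic.2 [] ∧
        PySem.Chars.startswith (text.drop ic.1.toNat) k.toList = true := by
  induction ps generalizing acc with
  | nil => simp
  | cons j js ih =>
    rw [List.foldl_cons, ih, pv_mem_inner_fold]
    simp only [List.mem_cons]
    constructor
    · rintro (⟨h | ⟨hk, hp⟩⟩ | ⟨ic, hi, hk, hp⟩)
      exacts [Or.inl h, Or.inr ⟨j, Or.inl rfl, hk, hp⟩, Or.inr ⟨ic, Or.inr hi, hk, hp⟩]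
    · rintro (h | ⟨ic, rfl | hi, hk, hp⟩)
      exacts [Or.inl (Or.inl h), Or.inl (Or.inr ⟨hk, hp⟩), Or.inr ⟨ic, hi, hk, hp⟩]

-- a nonempty keyword of the scanned list is in the scan exactly when it occurs in the text
theorem pv_scan_contains (text : List Char) (kws : List String) (k : String) (hk : k ∈ kws)
    (hne : k.toList ≠ []) :
    PySem.Set.contains (pvScan text kws) k = PySem.Chars.isIn k.toList text := by
  have hiff : PySem.Set.contains (pvScan text kws) k = true ↔
      PySem.Chars.isIn k.toList text = true := by
    rw [PySem.Set.contains_iff]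
    simp only [pvScan]
    rw [pv_mem_outer_fold]
    constructor
    · rintro (h0 | ⟨ic, -, -, hp⟩)
      · simp [PySem.Set.empty] at h0
      · rw [← PySem.Chars.exists_prefix_drop_iff_isIn]
        exact ⟨ic.1.toNat, (PySem.Chars.startswith_iff _ _).mp hp⟩
    · intro h
      rw [← PySem.Chars.exists_prefix_drop_iff_isIn] at h
      obtain ⟨j, hj⟩ := h
      have hjlt : j < text.length := by
        by_contra hge
        rw [List.drop_eq_nil_of_le (by omega), List.prefix_nil] at hj
        exact hne hj
      obtain ⟨h0, t, hkl⟩ : ∃ h0 t, k.toList = h0 :: t := by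
        cases hkl : k.toList with
        | nil => exact absurd hkl hne
        | cons a b => exact ⟨a, b, rfl⟩
      have hhead : h0 = text[j] := by
        obtain ⟨r, hr⟩ := hj
        rw [hkl] at hr
        have h1 : (List.drop j text).head? = some h0 := by rw [← hr]; rfl
        rw [List.head?_eq_getElem?, List.getElem?_drop] at h1
        simp only [Nat.add_zero] at h1
        rw [List.getElem?_eq_getElem hjlt] at h1
        exact (Option.some_inj.mp h1).symm
      refine Or.inr ⟨((j : Int), text[j]), ?_, ?_, ?_⟩
      · rw [PySem.List.mem_enumerate_iff]
        exact ⟨j, hjlt, by simp⟩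
      · rw [pv_mem_index]
        exact ⟨hk, by simp [hkl, hhead]⟩
      · simpa using (PySem.Chars.startswith_iff _ _).mpr hj
  exact Bool.eq_iff_iff.mpr hiff

-- 'any' of memberships in the scan, over a sublist of the scanned keywords
theorem pv_any_scan_contains (text : List Char) (kws sub : List String)
    (hsub : ∀ t ∈ sub, t ∈ kws) (hne : ∀ t ∈ sub, t.toList ≠ []) :
    sub.any (fun t => PySem.Set.contains (pvScan text kws) t) =
      sub.any (fun t => PySem.Chars.isIn t.toList text) := by
  induction sub with
  | nil => rfl
  | cons x xs ih =>
    simp only [List.any_cons]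
    rw [pv_scan_contains text kws x (hsub x List.mem_cons_self) (hne x List.mem_cons_self),
        ih (fun t ht => hsub t (List.mem_cons_of_mem _ ht)) (fun t ht => hne t (List.mem_cons_of_mem _ ht))]

-- ===== VERDICT (by name: the statement is the Claim_ definition above) =====
theorem classify_sport_from_leg_py_spec : Claim_equal_classify_sport_from_leg_py := by
  intro leg_str _
  unfold Spec_classify_sport_from_leg_py classify_sport_from_leg_py classify_sport_from_leg_py_alt pvDecide
  simp only []
  rw [pv_any_scan_contains _ pvUpperKeywords
        ["KXEPL", "KXLALIGA", "KXSERIEA", "KXBUNDESLIGA", "KXLIGUE1", "KXUCL", "KXSOCCER"] (by decide) (by decide),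
      pv_any_scan_contains _ pvUpperKeywords
        ["TOTAL RUNS", "HITS", "STRIKEOUTS", "RBI", "INNINGS", "HOME RUN", "EARNED RUN"] (by decide) (by decide),
      pv_any_scan_contains _ pvUpperKeywords
        ["PTS", "REB", "AST", "3PM", "BLK", "STL", "POINTS SCORED"] (by decide) (by decide),
      pv_any_scan_contains _ pvUpperKeywords
        ["GOALS", "BTTS", "BOTH TEAMS TO SCORE", "CLEAN SHEET"] (by decide) (by decide),
      pv_any_scan_contains _ pvUpperKeywords ["SAVES", "SHOTS ON GOAL"] (by decide) (by decide),
      pv_any_scan_contains _ (pvNhlTeams ++ pvNbaTeams) pvNhlTeams (by decide) (by decide),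
      pv_any_scan_contains _ (pvNhlTeams ++ pvNbaTeams) pvNbaTeams (by decide) (by decide),
      pv_scan_contains _ pvUpperKeywords "KXMLB" (by decide) (by decide),
      pv_scan_contains _ pvUpperKeywords "KXMVEMLB" (by decide) (by decide),
      pv_scan_contains _ pvUpperKeywords "KXNBA" (by decide) (by decide),
      pv_scan_contains _ pvUpperKeywords "KXMVENBA" (by decide) (by decide),
      pv_scan_contains _ pvUpperKeywords "KXNCAAMB" (by decide) (by decide),
      pv_scan_contains _ pvUpperKeywords "KXNCAAB" (by decide) (by decide),
      pv_scan_contains _ pvUpperKeywords "KXMVENCAAMB" (by decide) (by decide),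
      pv_scan_contains _ pvUpperKeywords "KXNHL" (by decide) (by decide),
      pv_scan_contains _ pvUpperKeywords "KXMVENHL" (by decide) (by decide),
      pv_scan_contains _ pvUpperKeywords "WINS BY OVER" (by decide) (by decide),
      pv_scan_contains _ pvUpperKeywords "POINTS" (by decide) (by decide)]
  simp [PySem.Str.isIn_eq]
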